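-- pv_equiv track=rewrite | github.com/Antonwyck/IrisScribe-LocalAI--Research_Assistant | app.py | clean_final_answer
-- ===== SOURCE A (Python) =====
-- def clean_final_answer(text: str) -> str:
--     text = text.strip()
--
--     cut_phrases = [
--         "Would you like me to",
--         "Yes or No?",
--         "Thank you for your interest",
--         "If there's anything else I can assist you with",
--         "Do not guess missing facts",
--         "Do not add general commentary",
--         "If the answer is not clearly stated in the context",
--         "Use only one short paragraph",
--         "Prefer exact wording from the context when possible",
--     ]
--
--     for phrase in cut_phrases:
--         idx = text.find(phrase)
--         if idx != -1:
--             text = text[:idx].strip()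
--
--     if text and text[-1] not in ".!?":
--         last_punct = max(text.rfind("."), text.rfind("!"), text.rfind("?"))
--         if last_punct != -1:
--             text = text[:last_punct + 1]
--
--     return text
-- ===== SOURCE B (Python) =====
-- def clean_final_answer(text: str) -> str:
--     t = text.strip()
--
--     # Single left-to-right scan over positions: cut once at the first index where
--     # any boilerplate phrase starts (leading whitespace is already stripped, so
--     # the earliest phrase boundary alone determines A's cascade's result).
--     for i in range(len(t)):
--         if (t.startswith("Would you like me to", i)
--                 or t.startswith("Yes or No?", i)
--                 or t.startswith("Thank you for your interest", i)
--                 or t.startswith("If there's anything else I can assist you with", i)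
--                 or t.startswith("Do not guess missing facts", i)
--                 or t.startswith("Do not add general commentary", i)
--                 or t.startswith("If the answer is not clearly stated in the context", i)
--                 or t.startswith("Use only one short paragraph", i)
--                 or t.startswith("Prefer exact wording from the context when possible", i)):
--             t = t[:i].strip()
--             break
--
--     # Reverse scan for the last sentence-ending punctuation instead of three rfinds.
--     if t and t[-1] not in ".!?":
--         for j in range(len(t) - 1, -1, -1):
--             if t[j] in ".!?":
--                 t = t[:j + 1]
--                 break
--
--     return t
-- ===== Notes on version B (the rewrite author's own statement) =====
-- stated objective: alternative
-- what changed: Replaces A's stateful cascade over a phrase list (nine successive find/cut/strip mutations, each re-searching the truncated text) by a single left-to-right scan over text positions that cuts once at the first index where any boilerplate phrase starts, and replaces the three rfind calls of the trailing-sentence trim by one reverse scan for the last sentence-ending punctuation character.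
import Mathlib
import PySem

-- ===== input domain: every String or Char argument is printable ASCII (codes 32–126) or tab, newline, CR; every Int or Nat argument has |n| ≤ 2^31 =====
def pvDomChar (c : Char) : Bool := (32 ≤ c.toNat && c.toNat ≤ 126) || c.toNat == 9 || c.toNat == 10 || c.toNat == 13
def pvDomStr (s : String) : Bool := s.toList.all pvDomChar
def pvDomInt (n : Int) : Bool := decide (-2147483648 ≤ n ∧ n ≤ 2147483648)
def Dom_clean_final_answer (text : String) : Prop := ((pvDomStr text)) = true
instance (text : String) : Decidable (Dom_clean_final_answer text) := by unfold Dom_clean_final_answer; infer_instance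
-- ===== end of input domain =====

-- B replaces A's per-phrase find/cut/strip cascade by one left-to-right position scan
-- that cuts at the first index where any phrase starts, and replaces the three rfinds
-- of the trailing trim by one reverse scan (objective: alternative decomposition).

-- ===== PORT A =====
-- A's cut_phrases list literal
def pv_cut_phrases : List (List Char) :=
  ["Would you like me to".toList,
   "Yes or No?".toList,
   "Thank you for your interest".toList,
   "If there's anything else I can assist you with".toList,
   "Do not guess missing facts".toList,
   "Do not add general commentary".toList,
   "If the answer is not clearly stated in the context".toList,
   "Use only one short paragraph".toList,
   "Prefer exact wording from the context when possible".toList]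

-- body of A's 'for phrase in cut_phrases' loop
def pv_stepA (t p : List Char) : List Char :=
  let idx := PySem.Chars.find t p
  if idx ≠ -1 then PySem.Chars.strip (PySem.Chars.slice t none (some idx)) else t

-- A's trailing block: if text and text[-1] not in ".!?": lp = max of three rfinds; cut
def pv_tailA (t : List Char) : List Char :=
  match PySem.Chars.pyGet? t (-1) with
  | none => t        -- 'if text' fails: text is empty
  | some c =>
    if PySem.Chars.isIn [c] ['.', '!', '?'] then t
    else
      let lp := max (max (PySem.Chars.rfind t ['.']) (PySem.Chars.rfind t ['!']))
                    (PySem.Chars.rfind t ['?'])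
      if lp ≠ -1 then PySem.Chars.slice t none (some (lp + 1)) else t

def clean_final_answer (text : String) : String :=
  String.mk (pv_tailA (pv_cut_phrases.foldl pv_stepA (PySem.Chars.strip text.toList)))

-- ===== PORT B =====
-- the 9-way 'or' of t.startswith(phrase, i) tests (startswith with offset i = prefix of t.drop i)
def pvHit (t : List Char) (i : Nat) : Bool :=
  "Would you like me to".toList.isPrefixOf (t.drop i) ||
  "Yes or No?".toList.isPrefixOf (t.drop i) ||
  "Thank you for your interest".toList.isPrefixOf (t.drop i) ||
  "If there's anything else I can assist you with".toList.isPrefixOf (t.drop i) ||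
  "Do not guess missing facts".toList.isPrefixOf (t.drop i) ||
  "Do not add general commentary".toList.isPrefixOf (t.drop i) ||
  "If the answer is not clearly stated in the context".toList.isPrefixOf (t.drop i) ||
  "Use only one short paragraph".toList.isPrefixOf (t.drop i) ||
  "Prefer exact wording from the context when possible".toList.isPrefixOf (t.drop i)

-- B's 'for i in range(len(t)): if <any phrase starts at i>: t = t[:i].strip(); break'
def pvCutLoop (t : List Char) (i : Nat) : List Char :=
  if i < t.length then
    if pvHit t i then PySem.Chars.strip (t.take i) else pvCutLoop t (i + 1)
  else t
termination_by t.length - i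

-- B's "c in '.!?'" membership test
def pvPunct (c : Char) : Bool := c == '.' || c == '!' || c == '?'

-- B's 'for j in range(len(t)-1, -1, -1): if t[j] in ".!?": t = t[:j+1]; break'
-- (t[j] is ported as t.getD j ' ': j is always in range here)
def pvTailLoop (t : List Char) : Nat → List Char
  | 0 => if pvPunct (t.getD 0 ' ') then t.take 1 else t
  | j + 1 => if pvPunct (t.getD (j + 1) ' ') then t.take (j + 2) else pvTailLoop t j

def clean_final_answer_alt (text : String) : String :=
  let t := PySem.Chars.strip text.toList
  let t2 := pvCutLoop t 0
  String.mk (match t2.getLast? with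
    | none => t2                                  -- 'if t' fails: empty
    | some c =>
      if pvPunct c then t2
      else pvTailLoop t2 (t2.length - 1))

-- ===== PRECONDITION & SPEC =====
def Spec_clean_final_answer (text : String) (out : String) : Prop := out = clean_final_answer_alt text
instance (text : String) (out : String) : Decidable (Spec_clean_final_answer text out) := by unfold Spec_clean_final_answer; infer_instance

-- ===== CLAIM (what is proved, stated in full; the proofs are below) =====
def Claim_equal_clean_final_answer : Prop := ∀ (text : String), Dom_clean_final_answer text → Spec_clean_final_answer text (clean_final_answer text)

-- ===== LEMMAS AND PROOFS =====

-- running minimum of the found phrase positions (what A's cascade cuts at)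
def pvG (s : List Char) (m : Nat) (p : List Char) : Nat :=
  if 0 ≤ PySem.Chars.find s p ∧ (PySem.Chars.find s p).toNat < m
  then (PySem.Chars.find s p).toNat else m

-- invariant of A's loop: the text is always rstrip (s.take m), m the running min cut,
-- and m is |s| or the find-position of some phrase (an occurrence starts at m)
def pvState (s t : List Char) (m : Nat) : Prop :=
  t = PySem.Chars.rstrip (s.take m) ∧ m ≤ s.length ∧
    (m = s.length ∨ ∃ p ∈ pv_cut_phrases, p <+: s.drop m)

-- "some phrase starts at position i" (proposition form of B's pvHit)
def pvHitP (t : List Char) (i : Nat) : Prop := ∃ p ∈ pv_cut_phrases, p <+: t.drop i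

lemma pv_dropWhile_prefix (p : Char → Bool) (x e : List Char) :
    x.dropWhile p <+: (x ++ e).dropWhile p := by
  induction x with
  | nil => simp
  | cons c x ih =>
    by_cases h : p c
    · simpa [List.dropWhile_cons, h] using ih
    · simp [h]

lemma pv_dropWhile_append (p : Char → Bool) (w y : List Char) (hw : ∀ c ∈ w, p c = true) :
    (w ++ y).dropWhile p = y.dropWhile p := by
  induction w with
  | nil => simp
  | cons c w ih =>
    simp only [List.cons_append, List.dropWhile_cons, hw c (by simp)]
    simp only [if_pos]
    exact ih (fun c hc => hw c (by simp [hc]))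

lemma pv_head_dropWhile (p : Char → Bool) (l : List Char) (c : Char)
    (h : (l.dropWhile p).head? = some c) : p c = false := by
  induction l with
  | nil => simp at h
  | cons d l ih =>
    rw [List.dropWhile_cons] at h
    by_cases hd : p d = true
    · rw [if_pos hd] at h; exact ih h
    · rw [if_neg hd] at h
      simp only [List.head?_cons, Option.some.injEq] at h
      subst h
      simpa using hd

lemma pv_dropWhile_noop (p : Char → Bool) (u : List Char)
    (h : ∀ c, u.head? = some c → p c = false) : u.dropWhile p = u := by
  cases u with
  | nil => rfl
  | cons c v => simp [h c rfl]

lemma pv_rstrip_decomp (u : List Char) :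
    ∃ w, u = PySem.Chars.rstrip u ++ w ∧ ∀ c ∈ w, PySem.Chars.isspace c = true := by
  refine ⟨(u.reverse.takeWhile PySem.Chars.isspace).reverse, ?_, ?_⟩
  · show u = (List.dropWhile PySem.Chars.isspace u.reverse).reverse ++ _
    conv_lhs => rw [← u.reverse_reverse,
      ← List.takeWhile_append_dropWhile (p := PySem.Chars.isspace) (l := u.reverse)]
    rw [List.reverse_append]
  · intro c hc
    rw [List.mem_reverse] at hc
    exact List.mem_takeWhile_imp hc

lemma pv_rstrip_prefix (u : List Char) : PySem.Chars.rstrip u <+: u := by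
  obtain ⟨w, hw, -⟩ := pv_rstrip_decomp u
  exact ⟨w, hw.symm⟩

lemma pv_rstrip_noop (u : List Char)
    (h : ∀ c, u.getLast? = some c → PySem.Chars.isspace c = false) :
    PySem.Chars.rstrip u = u := by
  show (List.dropWhile PySem.Chars.isspace u.reverse).reverse = u
  cases hrev : u.reverse with
  | nil =>
    have : u = [] := by simpa using congrArg List.reverse hrev
    simp [this]
  | cons c v =>
    have hc : u.getLast? = some c := by
      rw [← List.head?_reverse, hrev, List.head?_cons]
    rw [List.dropWhile_cons, h c hc, if_neg Bool.false_ne_true, ← hrev, List.reverse_reverse]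

lemma pv_prefix_head? (x y : List Char) (h : x <+: y) (hx : x ≠ []) :
    y.head? = x.head? := by
  obtain ⟨e, rfl⟩ := h
  cases x with
  | nil => exact absurd rfl hx
  | cons c v => simp

lemma pv_lstrip_eq (u : List Char) :
    PySem.Chars.lstrip u = u.dropWhile PySem.Chars.isspace := rfl

lemma pv_strip_eq (u : List Char) :
    PySem.Chars.strip u = PySem.Chars.rstrip (PySem.Chars.lstrip u) := rfl

lemma pv_strip_head (x : List Char) (c : Char)
    (h : (PySem.Chars.strip x).head? = some c) : PySem.Chars.isspace c = false := by
  rw [pv_strip_eq] at h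
  have hne : PySem.Chars.rstrip (PySem.Chars.lstrip x) ≠ [] := by
    intro hnil; rw [hnil] at h; simp at h
  have hh := pv_prefix_head? _ _ (pv_rstrip_prefix (PySem.Chars.lstrip x)) hne
  rw [← hh, pv_lstrip_eq] at h
  exact pv_head_dropWhile _ _ _ h

lemma pv_strip_last (x : List Char) (c : Char)
    (h : (PySem.Chars.strip x).getLast? = some c) : PySem.Chars.isspace c = false := by
  rw [pv_strip_eq] at h
  have hre : PySem.Chars.rstrip (PySem.Chars.lstrip x)
      = (List.dropWhile PySem.Chars.isspace (PySem.Chars.lstrip x).reverse).reverse := rfl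
  rw [hre, ← List.head?_reverse, List.reverse_reverse] at h
  exact pv_head_dropWhile _ _ _ h

lemma pv_rstrip_strip (x : List Char) :
    PySem.Chars.rstrip (PySem.Chars.strip x) = PySem.Chars.strip x :=
  pv_rstrip_noop _ (fun c hc => pv_strip_last x c hc)

lemma pv_take_head? (s : List Char) (k : Nat) (hk : k ≠ 0) :
    (s.take k).head? = s.head? := by
  cases s with
  | nil => simp
  | cons c v => cases k with
    | zero => exact absurd rfl hk
    | succ n => simp

lemma pv_strip_take (s : List Char) (k : Nat)
    (hh : ∀ c, s.head? = some c → PySem.Chars.isspace c = false) :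
    PySem.Chars.strip (s.take k) = PySem.Chars.rstrip (s.take k) := by
  rw [pv_strip_eq, pv_lstrip_eq]
  congr 1
  apply pv_dropWhile_noop
  intro c hc
  rcases Nat.eq_zero_or_pos k with hk | hk
  · rw [hk] at hc; simp at hc
  · rw [pv_take_head? s k (by omega)] at hc
    exact hh c hc

lemma pv_prefix_take (x u : List Char) (k : Nat) (h : x <+: u) (hk : x.length ≤ k) :
    x <+: u.take k := by
  obtain ⟨e, rfl⟩ := h
  rw [List.take_append, List.take_of_length_le hk]
  exact ⟨e.take (k - x.length), rfl⟩

lemma pv_prefix_drop_of_prefix_take_drop (s : List Char) (l j : Nat) (p : List Char)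
    (h : p <+: (s.take l).drop j) : p <+: s.drop j := by
  rw [List.drop_take] at h
  exact h.trans (List.take_prefix _ _)

lemma pv_find_neg (t p : List Char) (h : ∀ j, ¬ p <+: t.drop j) :
    PySem.Chars.find t p = -1 := by
  rw [PySem.Chars.find_eq_neg_one_iff]
  intro hinf
  have hin : PySem.Chars.isIn p t = true := (PySem.Chars.isIn_iff_infix p t).mpr hinf
  obtain ⟨j, hj⟩ := (PySem.Chars.exists_prefix_drop_iff_isIn p t).mpr hin
  exact h j hj

-- the concrete no-overlap facts about the nine phrases: no proper suffix of a phrase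
-- is (whitespace ++ a prefix-compatible piece) of a phrase
def pv_F : Prop := ∀ p' ∈ pv_cut_phrases, ∀ p ∈ pv_cut_phrases, ∀ d : Nat, d < p.length → 1 ≤ d →
  ((p.drop d).dropWhile PySem.Chars.isspace ≠ [] ∧
   ¬ ((p.drop d).dropWhile PySem.Chars.isspace <+: p') ∧
   ¬ (p' <+: (p.drop d).dropWhile PySem.Chars.isspace))

set_option maxRecDepth 8000 in
set_option maxHeartbeats 4000000 in
lemma pv_F_holds : pv_F := by unfold pv_F; decide

set_option maxRecDepth 8000 in
lemma pv_phrases_ne_nil : ∀ p ∈ pv_cut_phrases, p ≠ [] := by decide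

set_option maxRecDepth 8000 in
lemma pv_phrases_headD : ∀ p ∈ pv_cut_phrases,
    PySem.Chars.isspace (p.headD 'A') = false := by decide

lemma pv_phrases_head : ∀ p ∈ pv_cut_phrases, ∀ c, p.head? = some c →
    PySem.Chars.isspace c = false := by
  intro p hp c hc
  cases p with
  | nil => simp at hc
  | cons d l =>
    simp only [List.head?_cons, Option.some.injEq] at hc
    subst hc
    have hD := pv_phrases_headD _ hp
    rwa [List.headD_cons] at hD

-- the heart: one step of A's loop preserves the invariant, moving m to pvG s m p
lemma pv_step (s : List Char)
    (hh : ∀ c, s.head? = some c → PySem.Chars.isspace c = false)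
    (p : List Char) (hp : p ∈ pv_cut_phrases) (t : List Char) (m : Nat)
    (h : pvState s t m) : pvState s (pv_stepA t p) (pvG s m p) := by
  obtain ⟨ht, hm, hwit⟩ := h
  have htp : t <+: s.take m := ht ▸ pv_rstrip_prefix (s.take m)
  have hts : t <+: s := htp.trans (List.take_prefix m s)
  have htake : t = s.take t.length := (List.prefix_iff_eq_take).mp hts
  have hlen : t.length ≤ m := by
    have := htp.length_le
    rw [List.length_take] at this
    omega
  obtain ⟨w, hw, hwws⟩ := pv_rstrip_decomp (s.take m)
  rw [← ht] at hw   -- hw : s.take m = t ++ w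
  have hwlen : t.length + w.length = m := by
    have hl := congrArg List.length hw
    rw [List.length_append, List.length_take] at hl
    omega
  have hpne : p ≠ [] := pv_phrases_ne_nil p hp
  have hnegle := PySem.Chars.neg_one_le_find s p
  by_cases hfind : PySem.Chars.find s p = -1
  · -- phrase nowhere in s: A does not cut, pvG keeps m
    have hnf : ∀ j, ¬ p <+: s.drop j := by
      intro j hj
      have hin : PySem.Chars.isIn p s = true :=
        (PySem.Chars.exists_prefix_drop_iff_isIn p s).mp ⟨j, hj⟩
      rw [PySem.Chars.find_eq_neg_one_iff] at hfind
      exact hfind ((PySem.Chars.isIn_iff_infix p s).mp hin)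
    have hft : PySem.Chars.find t p = -1 := by
      apply pv_find_neg
      intro j hj
      rw [htake] at hj
      exact hnf j (pv_prefix_drop_of_prefix_take_drop s t.length j p hj)
    have hA : pv_stepA t p = t := by
      simp only [pv_stepA]
      rw [hft]
      simp
    have hG : pvG s m p = m := by
      simp only [pvG, hfind]
      norm_num
    rw [hA, hG]
    exact ⟨ht, hm, hwit⟩
  · have h0 : 0 ≤ PySem.Chars.find s p := by omega
    obtain ⟨hocc, hmins⟩ := PySem.Chars.find_spec h0
    set a := (PySem.Chars.find s p).toNat with ha
    by_cases ham : a < m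
    · -- the occurrence fits inside t : A cuts at a, pvG goes to a
      have hal : a < t.length := by
        by_contra hge
        push_neg at hge
        have hsplit : s = t ++ w ++ s.drop m := by
          rw [← hw, List.take_append_drop]
        have hdrop : s.drop a = w.drop (a - t.length) ++ s.drop m := by
          conv_lhs => rw [hsplit]
          rw [List.append_assoc, List.drop_append, List.drop_of_length_le hge,
              List.nil_append, List.drop_append]
          have h0' : a - t.length - w.length = 0 := by omega
          rw [h0', List.drop_zero]
        have hwdne : w.drop (a - t.length) ≠ [] := by
          intro hnil
          have hlen' := congrArg List.length hnil
          rw [List.length_drop, List.length_nil] at hlen'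
          omega
        obtain ⟨c, v, hcv⟩ := List.exists_cons_of_ne_nil hwdne
        have hch : (s.drop a).head? = some c := by
          rw [hdrop, hcv]; simp
        have hph : (s.drop a).head? = p.head? := pv_prefix_head? p _ hocc hpne
        have hcp : p.head? = some c := by rw [← hph]; exact hch
        have hcf : PySem.Chars.isspace c = false := pv_phrases_head p hp c hcp
        have hcw : c ∈ w := by
          have : c ∈ w.drop (a - t.length) := by rw [hcv]; simp
          exact List.mem_of_mem_drop this
        rw [hwws c hcw] at hcf
        exact absurd hcf (by decide)
      have hfit : a + p.length ≤ t.length := by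
        by_contra hbig
        push_neg at hbig
        set d := t.length - a with hd
        have hd1 : 1 ≤ d := by omega
        have hdp : d < p.length := by omega
        obtain ⟨r, hr⟩ := hocc
        have hsplit : s = t ++ (w ++ s.drop m) := by
          rw [← List.append_assoc, ← hw, List.take_append_drop]
        have hdropa : s.drop a = t.drop a ++ (w ++ s.drop m) := by
          conv_lhs => rw [hsplit]
          rw [List.drop_append]
          have h0' : a - t.length = 0 := by omega
          rw [h0', List.drop_zero]
        have hlent : (t.drop a).length = d := by
          have hld := List.length_drop (i := a) (l := t)
          omega
        have heq : p ++ r = t.drop a ++ (w ++ s.drop m) := by rw [hr]; exact hdropa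
        have heq2 : p.take d ++ (p.drop d ++ r) = t.drop a ++ (w ++ s.drop m) := by
          rw [← List.append_assoc, List.take_append_drop]
          exact heq
        have hlen2 : (p.take d).length = (t.drop a).length := by
          rw [List.length_take, hlent]
          omega
        obtain ⟨-, htail⟩ := List.append_inj heq2 hlen2
        have hpre : p.drop d <+: w ++ s.drop m := ⟨r, htail⟩
        have hq : (p.drop d).dropWhile PySem.Chars.isspace <+:
            (w ++ s.drop m).dropWhile PySem.Chars.isspace := by
          obtain ⟨e, he⟩ := hpre
          rw [← he]
          exact pv_dropWhile_prefix _ _ _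
        rw [pv_dropWhile_append _ _ _ hwws] at hq
        rcases hwit with hms | ⟨p'', hp'', hoccp''⟩
        · obtain ⟨hF1, hF2, hF3⟩ := pv_F_holds p hp p hp d hdp hd1
          rw [hms, List.drop_length] at hq
          simp only [List.dropWhile_nil] at hq
          exact hF1 (List.prefix_nil.mp hq)
        · have hp''ne : p'' ≠ [] := pv_phrases_ne_nil p'' hp''
          have hdm : (s.drop m).dropWhile PySem.Chars.isspace = s.drop m := by
            apply pv_dropWhile_noop
            intro c hc
            have hph'' := pv_prefix_head? p'' _ hoccp'' hp''ne
            rw [hph''] at hc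
            exact pv_phrases_head p'' hp'' c hc
          rw [hdm] at hq
          obtain ⟨hF1', hF2', hF3'⟩ := pv_F_holds p'' hp'' p hp d hdp hd1
          rcases List.prefix_or_prefix_of_prefix hq hoccp'' with hcase | hcase
          · exact hF2' hcase
          · exact hF3' hcase
      have hocct : p <+: t.drop a := by
        rw [htake, List.drop_take]
        exact pv_prefix_take p (s.drop a) (t.length - a) hocc (by omega)
      have hmint : ∀ j, j < a → ¬ p <+: t.drop j := by
        intro j hj hpre
        rw [htake] at hpre
        exact hmins j hj (pv_prefix_drop_of_prefix_take_drop s t.length j p hpre)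
      have hft : PySem.Chars.find t p = (a : Int) := by
        have hin : PySem.Chars.isIn p t = true :=
          (PySem.Chars.exists_prefix_drop_iff_isIn p t).mp ⟨a, hocct⟩
        have hne : PySem.Chars.find t p ≠ -1 := by
          rw [PySem.Chars.find_ne_neg_one_iff]
          exact (PySem.Chars.isIn_iff_infix p t).mp hin
        have h0' : 0 ≤ PySem.Chars.find t p := by
          have := PySem.Chars.neg_one_le_find t p
          omega
        obtain ⟨hoccf, hminf⟩ := PySem.Chars.find_spec h0'
        have h1 : ¬ ((PySem.Chars.find t p).toNat < a) := fun hlt => hmint _ hlt hoccf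
        have h2 : ¬ (a < (PySem.Chars.find t p).toNat) := fun hlt => hminf a hlt hocct
        omega
      have hA : pv_stepA t p =
          PySem.Chars.strip (PySem.Chars.slice t none (some (a : Int))) := by
        simp only [pv_stepA]
        rw [hft, if_pos (show ((a : Int)) ≠ -1 by omega)]
      have hslice : PySem.Chars.slice t none (some (a : Int)) = t.take a := by
        rw [PySem.Chars.slice_eq_listSlice, PySem.List.slice_to t (Int.natCast_nonneg a)]
        simp
      have htka : t.take a = s.take a := by
        rw [htake, List.take_take]
        congr 1
        omega
      have hG : pvG s m p = a := by
        simp only [pvG]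
        rw [← ha, if_pos ⟨h0, ham⟩]
      rw [hA, hslice, htka, hG]
      exact ⟨pv_strip_take s a hh, by omega, Or.inr ⟨p, hp, hocc⟩⟩
    · -- phrase occurs only at/after the cut: not found in t, nothing changes
      have hft : PySem.Chars.find t p = -1 := by
        apply pv_find_neg
        intro j hj
        have hjs : p <+: s.drop j := by
          rw [htake] at hj
          exact pv_prefix_drop_of_prefix_take_drop s t.length j p hj
        have hja : ¬ (j < a) := fun hlt => hmins j hlt hjs
        have hl0 : (t.drop j).length = 0 := by
          rw [List.length_drop]
          omega
        rw [List.length_eq_zero_iff] at hl0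
        rw [htake] at hl0
        rw [htake, hl0, List.prefix_nil] at hj
        exact hpne hj
      have hA : pv_stepA t p = t := by
        simp only [pv_stepA]
        rw [hft]
        simp
      have hG : pvG s m p = m := by
        simp only [pvG]
        rw [← ha, if_neg (fun hc => ham hc.2)]
      rw [hA, hG]
      exact ⟨ht, hm, hwit⟩

lemma pv_cascade (s : List Char)
    (hh : ∀ c, s.head? = some c → PySem.Chars.isspace c = false)
    (Q : List (List Char)) (hQ : ∀ p ∈ Q, p ∈ pv_cut_phrases) :
    ∀ t m, pvState s t m → pvState s (Q.foldl pv_stepA t) (Q.foldl (pvG s) m) := by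
  induction Q with
  | nil => intro t m h; exact h
  | cons p Q ih =>
    intro t m h
    have hp : p ∈ pv_cut_phrases := hQ p (by simp)
    simp only [List.foldl_cons]
    exact ih (fun q hq => hQ q (by simp [hq])) _ _ (pv_step s hh p hp t m h)

lemma pv_foldg_le (s : List Char) (Q : List (List Char)) :
    ∀ m, Q.foldl (pvG s) m ≤ m := by
  induction Q with
  | nil => intro m; simp
  | cons q Q ih =>
    intro m
    simp only [List.foldl_cons]
    refine le_trans (ih (pvG s m q)) ?_
    simp only [pvG]
    split <;> omega

lemma pv_foldg_min (s : List Char) (Q : List (List Char)) :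
    ∀ m, ∀ p ∈ Q, 0 ≤ PySem.Chars.find s p →
      Q.foldl (pvG s) m ≤ (PySem.Chars.find s p).toNat := by
  induction Q with
  | nil => intro m p hp; simp at hp
  | cons q Q ih =>
    intro m p hp h0
    rcases List.mem_cons.mp hp with rfl | hmem
    · simp only [List.foldl_cons]
      refine le_trans (pv_foldg_le s Q _) ?_
      simp only [pvG]
      split <;> omega
    · simp only [List.foldl_cons]
      exact ih _ p hmem h0

lemma pv_foldg_attained (s : List Char) (Q : List (List Char)) :
    ∀ m, Q.foldl (pvG s) m = m ∨
      ∃ p ∈ Q, 0 ≤ PySem.Chars.find s p ∧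
        Q.foldl (pvG s) m = (PySem.Chars.find s p).toNat := by
  induction Q with
  | nil => intro m; exact Or.inl rfl
  | cons q Q ih =>
    intro m
    simp only [List.foldl_cons]
    rcases ih (pvG s m q) with h | ⟨p, hp, h0, heq⟩
    · by_cases hcond : 0 ≤ PySem.Chars.find s q ∧ (PySem.Chars.find s q).toNat < m
      · refine Or.inr ⟨q, by simp, hcond.1, ?_⟩
        rw [h]
        simp only [pvG]
        rw [if_pos hcond]
      · refine Or.inl ?_
        rw [h]
        simp only [pvG]
        rw [if_neg hcond]
    · exact Or.inr ⟨p, by simp [hp], h0, heq⟩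

lemma pv_foldg_neg (s : List Char) (Q : List (List Char))
    (hQ : ∀ p ∈ Q, PySem.Chars.find s p = -1) : ∀ m, Q.foldl (pvG s) m = m := by
  induction Q with
  | nil => intro m; rfl
  | cons q Q ih =>
    intro m
    simp only [List.foldl_cons]
    have hG : pvG s m q = m := by
      simp only [pvG, hQ q (by simp)]
      norm_num
    rw [hG]
    exact ih (fun p hp => hQ p (by simp [hp])) m

-- ---------- cut stage: B's position scan equals A's cascade ----------

set_option maxRecDepth 8000 in
lemma pvHit_iff (t : List Char) (i : Nat) : pvHit t i = true ↔ pvHitP t i := by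
  constructor
  · intro h
    simp only [pvHit, Bool.or_eq_true, List.isPrefixOf_iff_prefix] at h
    rcases h with ((((((((h | h) | h) | h) | h) | h) | h) | h) | h)
    · exact ⟨"Would you like me to".toList, by decide, h⟩
    · exact ⟨"Yes or No?".toList, by decide, h⟩
    · exact ⟨"Thank you for your interest".toList, by decide, h⟩
    · exact ⟨"If there's anything else I can assist you with".toList, by decide, h⟩
    · exact ⟨"Do not guess missing facts".toList, by decide, h⟩
    · exact ⟨"Do not add general commentary".toList, by decide, h⟩
    · exact ⟨"If the answer is not clearly stated in the context".toList, by decide, h⟩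
    · exact ⟨"Use only one short paragraph".toList, by decide, h⟩
    · exact ⟨"Prefer exact wording from the context when possible".toList, by decide, h⟩
  · intro h
    obtain ⟨p, hp, hpre⟩ := h
    simp only [pvHit, Bool.or_eq_true, List.isPrefixOf_iff_prefix]
    rw [pv_cut_phrases] at hp
    simp only [List.mem_cons, List.not_mem_nil, or_false] at hp
    rcases hp with rfl | rfl | rfl | rfl | rfl | rfl | rfl | rfl | rfl
    · exact Or.inl (Or.inl (Or.inl (Or.inl (Or.inl (Or.inl (Or.inl (Or.inl (hpre))))))))
    · exact Or.inl (Or.inl (Or.inl (Or.inl (Or.inl (Or.inl (Or.inl (Or.inr hpre)))))))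
    · exact Or.inl (Or.inl (Or.inl (Or.inl (Or.inl (Or.inl (Or.inr hpre))))))
    · exact Or.inl (Or.inl (Or.inl (Or.inl (Or.inl (Or.inr hpre)))))
    · exact Or.inl (Or.inl (Or.inl (Or.inl (Or.inr hpre))))
    · exact Or.inl (Or.inl (Or.inl (Or.inr hpre)))
    · exact Or.inl (Or.inl (Or.inr hpre))
    · exact Or.inl (Or.inr hpre)
    · exact Or.inr hpre

lemma pvHitP_lt (t : List Char) (i : Nat) (h : pvHitP t i) : i < t.length := by
  obtain ⟨p, hp, hpre⟩ := h
  have hpne := pv_phrases_ne_nil p hp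
  have h1 := hpre.length_le
  have h2 : 0 < p.length := List.length_pos_iff.mpr hpne
  rw [List.length_drop] at h1
  omega

lemma pvCutLoop_no (t : List Char) (hall : ∀ j, ¬ pvHitP t j) :
    ∀ n i, t.length - i ≤ n → pvCutLoop t i = t := by
  intro n
  induction n with
  | zero =>
    intro i hle
    rw [pvCutLoop]
    rw [if_neg (by omega)]
  | succ n ih =>
    intro i hle
    rw [pvCutLoop]
    by_cases hi : i < t.length
    · rw [if_pos hi]
      have hhit : pvHit t i = false := by
        rcases Bool.eq_false_or_eq_true (pvHit t i) with h | h
        · exact absurd ((pvHit_iff t i).mp h) (hall i)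
        · exact h
      rw [hhit]
      simp only [Bool.false_eq_true, if_false]
      exact ih (i + 1) (by omega)
    · rw [if_neg hi]

lemma pvCutLoop_hit (t : List Char) (m : Nat) (hm : pvHitP t m)
    (hmin : ∀ j, j < m → ¬ pvHitP t j) :
    ∀ n i, m - i ≤ n → i ≤ m → pvCutLoop t i = PySem.Chars.strip (t.take m) := by
  have hmlt : m < t.length := pvHitP_lt t m hm
  intro n
  induction n with
  | zero =>
    intro i hle hi
    have him : i = m := by omega
    subst him
    rw [pvCutLoop, if_pos (by omega), if_pos ((pvHit_iff t i).mpr hm)]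
  | succ n ih =>
    intro i hle hi
    by_cases him : i = m
    · subst him
      rw [pvCutLoop, if_pos (by omega), if_pos ((pvHit_iff t i).mpr hm)]
    · have hilt : i < m := by omega
      rw [pvCutLoop, if_pos (by omega)]
      have hhit : pvHit t i = false := by
        rcases Bool.eq_false_or_eq_true (pvHit t i) with h | h
        · exact absurd ((pvHit_iff t i).mp h) (hmin i hilt)
        · exact h
      rw [hhit]
      simp only [Bool.false_eq_true, if_false]
      exact ih (i + 1) (by omega) (by omega)

-- B's scan = A's cascade, on the stripped text
lemma pv_cut_eq (x : List Char) :
    pv_cut_phrases.foldl pv_stepA (PySem.Chars.strip x) =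
      pvCutLoop (PySem.Chars.strip x) 0 := by
  set s := PySem.Chars.strip x with hs
  have hh : ∀ c, s.head? = some c → PySem.Chars.isspace c = false :=
    fun c hc => pv_strip_head x c (by rw [← hs]; exact hc)
  have hinit : pvState s s s.length := by
    refine ⟨?_, le_refl _, Or.inl rfl⟩
    rw [List.take_length, hs, pv_rstrip_strip]
  obtain ⟨hteq, hmle, -⟩ :=
    pv_cascade s hh pv_cut_phrases (fun p hp => hp) s s.length hinit
  set M := pv_cut_phrases.foldl (pvG s) s.length with hM
  by_cases hex : ∃ j, pvHitP s j
  · -- there is a hit; let m₀ be the first one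
    obtain ⟨j₀, hj₀⟩ := hex
    have hexn : ∃ j, (pvHit s j = true) := ⟨j₀, (pvHit_iff s j₀).mpr hj₀⟩
    classical
    set m₀ := Nat.find hexn with hm₀
    have hhit : pvHitP s m₀ := (pvHit_iff s m₀).mp (Nat.find_spec hexn)
    have hminh : ∀ j, j < m₀ → ¬ pvHitP s j := by
      intro j hj hP
      exact Nat.find_min hexn hj ((pvHit_iff s j).mpr hP)
    have hm₀lt : m₀ < s.length := pvHitP_lt s m₀ hhit
    -- M = m₀
    have hhit2 := hhit
    obtain ⟨p₀, hp₀, hpre₀⟩ := hhit2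
    have hfind₀ : 0 ≤ PySem.Chars.find s p₀ := by
      rw [PySem.Chars.find_nonneg_iff, ← PySem.Chars.isIn_iff_infix,
        ← PySem.Chars.exists_prefix_drop_iff_isIn]
      exact ⟨m₀, hpre₀⟩
    -- any find position is itself a hit, hence ≥ m₀; and find s p₀ ≤ m₀
    have hfle : (PySem.Chars.find s p₀).toNat ≤ m₀ := by
      obtain ⟨-, hmins⟩ := PySem.Chars.find_spec hfind₀
      by_contra hgt
      push_neg at hgt
      exact hmins m₀ hgt hpre₀
    have hMle : M ≤ m₀ :=
      le_trans (pv_foldg_min s pv_cut_phrases s.length p₀ hp₀ hfind₀) hfle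
    have hMge : m₀ ≤ M := by
      rcases pv_foldg_attained s pv_cut_phrases s.length with hc | ⟨q, hq, hq0, heq⟩
      · rw [← hM] at hc; omega
      · rw [← hM] at heq
        obtain ⟨hoccq, -⟩ := PySem.Chars.find_spec hq0
        have : pvHitP s (PySem.Chars.find s q).toNat := ⟨q, hq, hoccq⟩
        by_contra hlt
        push_neg at hlt
        exact hminh M (by omega) (heq ▸ this)
    have hMm : M = m₀ := le_antisymm hMle hMge
    rw [hteq, hMm, ← pv_strip_take s m₀ hh]
    exact (pvCutLoop_hit s m₀ hhit hminh m₀ 0 (by omega) (by omega)).symm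
  · -- no hit anywhere: no phrase occurs, the cascade and the scan leave s unchanged
    push_neg at hex
    have hneg : ∀ p ∈ pv_cut_phrases, PySem.Chars.find s p = -1 := by
      intro p hp
      exact pv_find_neg s p (fun j hj => hex j ⟨p, hp, hj⟩)
    have hMs : M = s.length := by
      rw [hM]; exact pv_foldg_neg s pv_cut_phrases hneg s.length
    rw [hteq, hMs, List.take_length, hs, pv_rstrip_strip, ← hs]
    exact (pvCutLoop_no s hex s.length 0 (by omega)).symm

-- ---------- tail stage: B's reverse scan equals A's three rfinds ----------

lemma pv_go_zero (t sub : List Char) :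
    PySem.Chars.rfind.go t sub 0 = if sub.isPrefixOf t then 0 else -1 := by
  simp [PySem.Chars.rfind.go]

lemma pv_go_succ (t sub : List Char) (j : Nat) :
    PySem.Chars.rfind.go t sub (j + 1) =
      if sub.isPrefixOf (t.drop (j + 1)) then ((j : Int) + 1)
      else PySem.Chars.rfind.go t sub j := by
  simp [PySem.Chars.rfind.go]

lemma pv_go_le (t sub : List Char) : ∀ k, PySem.Chars.rfind.go t sub k ≤ (k : Int) := by
  intro k
  induction k with
  | zero => rw [pv_go_zero]; split <;> omega
  | succ j ih =>
    rw [pv_go_succ]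
    split
    · push_cast; omega
    · push_cast; push_cast at ih; omega

lemma pv_single_isPrefixOf (c : Char) (l : List Char) :
    [c].isPrefixOf l = true ↔ l.head? = some c := by
  rw [List.isPrefixOf_iff_prefix]
  cases l with
  | nil => simp
  | cons d r =>
    constructor
    · intro h
      obtain ⟨e, he⟩ := h
      rw [← he]
      rfl
    · intro h
      rw [List.head?_cons, Option.some.injEq] at h
      subst h
      exact ⟨r, rfl⟩

-- max of the three per-char rfind scans, cut at position k
def pvL (t : List Char) (k : Nat) : Int :=
  max (max (PySem.Chars.rfind.go t ['.'] k) (PySem.Chars.rfind.go t ['!'] k))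
      (PySem.Chars.rfind.go t ['?'] k)

lemma pvL_zero (t : List Char) :
    pvL t 0 = if pvPunct (t.getD 0 ' ') then 0 else -1 := by
  simp only [pvL, pv_go_zero]
  rcases hh : t.head? with _ | c
  · have h0 : t[0]? = none := by rw [← List.head?_drop, List.drop_zero, hh]
    have hget : t.getD 0 ' ' = ' ' := by rw [List.getD_eq_getElem?_getD, h0]; rfl
    have hne : ∀ d : Char, ¬ ([d].isPrefixOf t = true) := by
      intro d hd
      rw [pv_single_isPrefixOf, hh] at hd
      cases hd
    rw [if_neg (hne '.'), if_neg (hne '!'), if_neg (hne '?'), hget]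
    decide
  · have h0 : t[0]? = some c := by rw [← List.head?_drop, List.drop_zero, hh]
    have hget : t.getD 0 ' ' = c := by rw [List.getD_eq_getElem?_getD, h0]; rfl
    have hpre : ∀ d : Char, ([d].isPrefixOf t = true) ↔ d = c := by
      intro d
      rw [pv_single_isPrefixOf, hh]
      simp [eq_comm]
    rw [hget]
    by_cases hd : c = '.'
    · subst hd; rw [if_pos ((hpre '.').mpr rfl)]
      rw [if_neg (fun h => by cases (hpre '!').mp h), if_neg (fun h => by cases (hpre '?').mp h)]
      decide
    · by_cases he : c = '!'
      · subst he
        rw [if_neg (fun h => by cases (hpre '.').mp h), if_pos ((hpre '!').mpr rfl),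
          if_neg (fun h => by cases (hpre '?').mp h)]
        decide
      · by_cases hf : c = '?'
        · subst hf
          rw [if_neg (fun h => by cases (hpre '.').mp h),
            if_neg (fun h => by cases (hpre '!').mp h), if_pos ((hpre '?').mpr rfl)]
          decide
        · rw [if_neg (fun h => hd ((hpre '.').mp h).symm),
            if_neg (fun h => he ((hpre '!').mp h).symm),
            if_neg (fun h => hf ((hpre '?').mp h).symm)]
          have : pvPunct c = false := by
            simp only [pvPunct, Bool.or_eq_false_iff, beq_eq_false_iff_ne]
            exact ⟨⟨fun h => hd h, fun h => he h⟩, fun h => hf h⟩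
          rw [this]
          decide

lemma pvL_succ (t : List Char) (j : Nat) :
    pvL t (j + 1) = if pvPunct (t.getD (j + 1) ' ') then ((j : Int) + 1) else pvL t j := by
  simp only [pvL, pv_go_succ]
  rcases hh : t[j+1]? with _ | c
  · have hdrop : (t.drop (j+1)).head? = none := by rw [List.head?_drop, hh]
    have hget : t.getD (j+1) ' ' = ' ' := by rw [List.getD_eq_getElem?_getD, hh]; rfl
    have hne : ∀ d : Char, ¬ ([d].isPrefixOf (t.drop (j+1)) = true) := by
      intro d hd
      rw [pv_single_isPrefixOf, hdrop] at hd
      cases hd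
    rw [if_neg (hne '.'), if_neg (hne '!'), if_neg (hne '?'), hget]
    have : pvPunct ' ' = false := by decide
    rw [this]
    simp
  · have hdrop : (t.drop (j+1)).head? = some c := by rw [List.head?_drop, hh]
    have hget : t.getD (j+1) ' ' = c := by rw [List.getD_eq_getElem?_getD, hh]; rfl
    have hpre : ∀ d : Char, ([d].isPrefixOf (t.drop (j+1)) = true) ↔ d = c := by
      intro d
      rw [pv_single_isPrefixOf, hdrop]
      simp [eq_comm]
    have hle1 := pv_go_le t ['.'] j
    have hle2 := pv_go_le t ['!'] j
    have hle3 := pv_go_le t ['?'] j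
    rw [hget]
    by_cases hd : c = '.'
    · subst hd
      rw [if_pos ((hpre '.').mpr rfl), if_neg (fun h => by cases (hpre '!').mp h),
        if_neg (fun h => by cases (hpre '?').mp h), if_pos (by decide)]
      omega
    · by_cases he : c = '!'
      · subst he
        rw [if_neg (fun h => by cases (hpre '.').mp h), if_pos ((hpre '!').mpr rfl),
          if_neg (fun h => by cases (hpre '?').mp h), if_pos (by decide)]
        omega
      · by_cases hf : c = '?'
        · subst hf
          rw [if_neg (fun h => by cases (hpre '.').mp h),
            if_neg (fun h => by cases (hpre '!').mp h), if_pos ((hpre '?').mpr rfl),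
            if_pos (by decide)]
          omega
        · have hnp : pvPunct c = false := by
            simp only [pvPunct, Bool.or_eq_false_iff, beq_eq_false_iff_ne]
            exact ⟨⟨fun h => hd h, fun h => he h⟩, fun h => hf h⟩
          rw [if_neg (fun h => hd ((hpre '.').mp h).symm),
            if_neg (fun h => he ((hpre '!').mp h).symm),
            if_neg (fun h => hf ((hpre '?').mp h).symm), hnp]
          simp

lemma pv_neg_one_le_L (t : List Char) (k : Nat) : -1 ≤ pvL t k := by
  induction k with
  | zero => rw [pvL_zero]; split <;> omega
  | succ j ih => rw [pvL_succ]; split <;> [push_cast; skip] <;> omega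

lemma pvTailLoop_eq (t : List Char) :
    ∀ k, pvTailLoop t k = if pvL t k = -1 then t else t.take ((pvL t k).toNat + 1) := by
  intro k
  induction k with
  | zero =>
    rw [pvTailLoop, pvL_zero]
    by_cases h : pvPunct (t.getD 0 ' ') = true
    · rw [if_pos h, if_pos h, if_neg (by omega)]
      rfl
    · rw [if_neg h, if_neg h, if_pos rfl]
  | succ j ih =>
    rw [pvTailLoop, pvL_succ]
    by_cases h : pvPunct (t.getD (j + 1) ' ') = true
    · rw [if_pos h, if_pos h, if_neg (by push_cast; omega)]
      have hnn : ((j : Int) + 1).toNat + 1 = j + 2 := by omega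
      rw [hnn]
    · rw [if_neg h, if_neg h, ih]

lemma pv_isIn_punct (c : Char) :
    PySem.Chars.isIn [c] ['.', '!', '?'] = pvPunct c := by
  by_cases h : pvPunct c = true
  · have hmem : c ∈ ['.', '!', '?'] := by
      simp only [pvPunct, Bool.or_eq_true, beq_iff_eq] at h
      rcases h with (h | h) | h <;> simp [h]
    obtain ⟨s₁, s₂, hsplit⟩ := List.append_of_mem hmem
    rw [h]
    exact (PySem.Chars.isIn_iff_infix _ _).mpr ⟨s₁, s₂, by rw [hsplit]; simp⟩
  · rw [Bool.not_eq_true] at h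
    rw [h, PySem.Chars.isIn_eq_false_iff]
    intro hinf
    have hmem : c ∈ ['.', '!', '?'] := hinf.subset (by simp)
    have hT : pvPunct c = true := by
      simp only [List.mem_cons, List.not_mem_nil, or_false] at hmem
      rcases hmem with h1 | h1 | h1 <;> (rw [h1]; rfl)
    rw [hT] at h
    cases h

lemma pv_tail_eq (u : List Char) :
    pv_tailA u = (match u.getLast? with
      | none => u
      | some c => if pvPunct c then u else pvTailLoop u (u.length - 1)) := by
  rw [pv_tailA]
  rw [show PySem.Chars.pyGet? u (-1) = PySem.List.pyGet? u (-1) from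
    PySem.Chars.pyGet?_eq_listPyGet? u (-1), PySem.List.pyGet?_neg_one]
  rcases hlast : u.getLast? with _ | c
  · rfl
  · have hne : u ≠ [] := by
      intro h; rw [h] at hlast; cases hlast
    have hlen : 1 ≤ u.length := by
      have := List.length_pos_iff.mpr hne
      omega
    simp only [pv_isIn_punct]
    by_cases hp : pvPunct c = true
    · rw [if_pos hp, if_pos hp]
    · rw [if_neg hp, if_neg hp]
      -- the three rfinds are the go-scan from u.length; position u.length never matches
      have hrfind : ∀ sub : List Char,
          PySem.Chars.rfind u sub = PySem.Chars.rfind.go u sub u.length := fun _ => rfl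
      have hlsucc : u.length = (u.length - 1) + 1 := by omega
      have hLdef : max (max (PySem.Chars.rfind u ['.']) (PySem.Chars.rfind u ['!']))
          (PySem.Chars.rfind u ['?']) = pvL u (u.length - 1) := by
        rw [hrfind, hrfind, hrfind]
        have : pvL u u.length = pvL u (u.length - 1) := by
          conv_lhs => rw [hlsucc]
          rw [pvL_succ]
          have hnone : u[(u.length - 1) + 1]? = none := by
            apply List.getElem?_eq_none
            omega
          have hget : u.getD ((u.length - 1) + 1) ' ' = ' ' := by
            rw [List.getD_eq_getElem?_getD, hnone]; rfl
          rw [hget]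
          have : pvPunct ' ' = false := by decide
          rw [this]
          simp
        rw [← this]
        rfl
      rw [hLdef, pvTailLoop_eq]
      by_cases hL : pvL u (u.length - 1) = -1
      · rw [if_neg (by rw [hL]; simp), if_pos hL]
      · have hL0 : 0 ≤ pvL u (u.length - 1) := by
          have := pv_neg_one_le_L u (u.length - 1)
          omega
        rw [if_pos hL, if_neg hL]
        rw [PySem.Chars.slice_eq_listSlice, PySem.List.slice_to u (by omega)]
        congr 1
        omega

-- ===== VERDICT (by name: the statement is the Claim_ definition above) =====
theorem clean_final_answer_spec : Claim_equal_clean_final_answer := by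
  intro text _hdom
  show clean_final_answer text = clean_final_answer_alt text
  simp only [clean_final_answer, clean_final_answer_alt]
  rw [pv_cut_eq text.toList, pv_tail_eq]
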